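-- pv_equiv track=rewrite | github.com/MaciekIKarolina/Nonogram-Project | Nonogram/Solver.py | cell_naming
-- ===== SOURCE A (Python) =====
-- def cell_naming(clues):
--     """
--     Returns cell naming scheme.
--
--     Cells are named by labelling them with unique, non-null integer values.
--     Each group is composed of consecutive, positive integers. Groups are
--     separated with negative integers. Moreover, thenaming begins and ends
--     with empty cells.
--
--     This implementation contains two tricks helpful for 'immediate_successors'
--     function:
--
--      - cells are labelled counting from 1 but empty cells getting negated value
--      - empty cells labels are doubled.
--
--     For example:
--
--     cell_naming([1,2,3]) ==> [-1, -1, 2, -3, -3, 4, 5, -6, -6]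
--                                ^   ^  ^   ^   ^  ^  ^   ^   ^
--                                |   |  |   |   |  |  |   |   |
--             empty cells        |   |  |   |   |  |  |   |   |
--             at the beginning --+---+  |   |   |  |  |   |   |
--                                       |   |   |  |  |   |   |
--               1st cell group (of 1) --+   |   |  |  |   |   |
--                                           |   |  |  |   |   |
--             1st group is separated from --+---+  |  |   |   |
--             next one by an empty cell            |  |   |   |
--             Note: it is doubled                  |  |   |   |
--                                                  |  |   |   |
--                       2nd cell group (of two)  --+--+   |   |
--                                                         |   |
--                          naming ends with empty cells --+---+
--
--     >>> list(cell_naming([1, 2]))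
--     [-1, -1, 2, -3, -3, 4, 5, -6, -6]
--
--     >>> list(cell_naming([1, 2, 3]))
--     [-1, -1, 2, -3, -3, 4, 5, -6, -6, 7, 8, 9, -10, -10]
--     """
--     it = 1
--
--     for clue in clues:
--         yield -it
--         yield -it
--         it += 1
--
--         for _ in range(clue):
--             yield it
--             it += 1
--
--     yield -it
--     yield -it
-- ===== SOURCE B (Python) =====
-- def cell_naming(clues):
--     # Different decomposition: precompute a flat list of slot markers
--     # (True = separator/empty slot, False = group cell), then one indexed
--     # pass over it; the 1-based enumerate index is the label.
--     slots = []
--     for clue in clues: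
--         slots.append(True)
--         slots.extend([False] * clue)
--     slots.append(True)
--     for i, is_sep in enumerate(slots, 1):
--         if is_sep:
--             yield -i
--             yield -i
--         else:
--             yield i
-- ===== Notes on version B (the rewrite author's own statement) =====
-- stated objective: alternative
-- what changed: B stays a generator but replaces A's nested loops with a mutated counter by first building a flat list of separator/cell slot markers and then a single enumerate(slots, 1) pass whose 1-based index is the label.
import Mathlib
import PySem

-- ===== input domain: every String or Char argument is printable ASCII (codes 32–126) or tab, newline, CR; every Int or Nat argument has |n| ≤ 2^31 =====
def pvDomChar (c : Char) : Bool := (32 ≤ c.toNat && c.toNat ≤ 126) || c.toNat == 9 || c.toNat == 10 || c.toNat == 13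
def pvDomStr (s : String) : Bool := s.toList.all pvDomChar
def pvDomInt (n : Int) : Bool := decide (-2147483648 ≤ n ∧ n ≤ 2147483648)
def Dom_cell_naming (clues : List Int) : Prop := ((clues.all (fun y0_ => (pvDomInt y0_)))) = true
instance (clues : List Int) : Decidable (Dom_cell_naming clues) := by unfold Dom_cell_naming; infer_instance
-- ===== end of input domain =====

-- B replaces A's nested loops with a mutable counter by a precomputed flat slot-marker
-- list plus one indexed pass (objective: alternative decomposition, same cost).


-- ===== PORT A =====
-- inner loop: 'for _ in range(clue): yield it; it += 1' — recursion over the range list,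
-- returns the yielded cells plus the updated counter
def cellNamingInnerA (it : Int) : List Int → List Int × Int
  | [] => ([], it)
  | _ :: rest =>
    let r := cellNamingInnerA (it + 1) rest
    (it :: r.1, r.2)

-- outer loop over clues with the running counter `it`; the trailing yields follow the loop
def cellNamingLoopA (it : Int) : List Int → List Int
  | [] => [-it, -it]
  | c :: rest =>
    match cellNamingInnerA (it + 1) (PySem.List.pyRange 0 c 1) with
    | (ys, it') => -it :: -it :: (ys ++ cellNamingLoopA it' rest)

def cell_naming (clues : List Int) : List Int := cellNamingLoopA 1 clues

-- ===== PORT B =====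
-- first pass of Source B: build the flat slot-marker list (true = separator, false = cell)
def cellNamingSlots (clues : List Int) : List Bool :=
  (clues.foldl (fun acc c => acc ++ true :: List.replicate c.toNat false) []) ++ [true]

-- second pass of Source B: 'for i, is_sep in enumerate(slots, 1)'
def cellNamingPass (i : Int) : List Bool → List Int
  | [] => []
  | true :: rest => -i :: -i :: cellNamingPass (i + 1) rest
  | false :: rest => i :: cellNamingPass (i + 1) rest

def cell_naming_alt (clues : List Int) : List Int := cellNamingPass 1 (cellNamingSlots clues)

-- ===== PRECONDITION & SPEC =====
def Spec_cell_naming (clues : List Int) (out : List Int) : Prop := out = cell_naming_alt clues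
instance (clues : List Int) (out : List Int) : Decidable (Spec_cell_naming clues out) := by unfold Spec_cell_naming; infer_instance

-- ===== CLAIM (what is proved, stated in full; the proofs are below) =====
def Claim_equal_cell_naming : Prop := ∀ (clues : List Int), Dom_cell_naming clues → Spec_cell_naming clues (cell_naming clues)

-- ===== LEMMAS AND PROOFS =====

-- proof helper: the list [i, i+1, ..., i+n-1]
def ramp (i : Int) : Nat → List Int
  | 0 => []
  | n + 1 => i :: ramp (i + 1) n

theorem cellNamingInnerA_eq (l : List Int) (it : Int) :
    cellNamingInnerA it l = (ramp it l.length, it + l.length) := by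
  induction l generalizing it with
  | nil => simp [cellNamingInnerA, ramp]
  | cons x rest ih =>
    simp only [cellNamingInnerA, ih, List.length_cons, ramp, Prod.mk.injEq, true_and]
    push_cast; ring

theorem cellNamingPass_replicate (n : Nat) (i : Int) (rest : List Bool) :
    cellNamingPass i (List.replicate n false ++ rest)
      = ramp i n ++ cellNamingPass (i + n) rest := by
  induction n generalizing i with
  | zero => simp [ramp]
  | succ m ih =>
    rw [List.replicate_succ, List.cons_append]
    simp only [cellNamingPass, ih, ramp, List.cons_append, List.cons.injEq, true_and,
      List.append_cancel_left_eq]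
    congr 1
    push_cast; ring

theorem cellNamingSlots_foldl (clues : List Int) (acc : List Bool) :
    clues.foldl (fun acc c => acc ++ true :: List.replicate c.toNat false) acc
      = acc ++ clues.flatMap (fun c => true :: List.replicate c.toNat false) := by
  induction clues generalizing acc with
  | nil => simp
  | cons c rest ih => simp [List.foldl_cons, ih]

theorem cellNamingLoopA_eq (clues : List Int) (it : Int) :
    cellNamingLoopA it clues
      = cellNamingPass it ((clues.flatMap (fun c => true :: List.replicate c.toNat false)) ++ [true]) := by
  induction clues generalizing it with
  | nil => simp [cellNamingLoopA, cellNamingPass]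
  | cons c rest ih =>
    have hlen : (PySem.List.pyRange 0 c 1).length = c.toNat := by
      simp [PySem.List.length_pyRange_one]
    simp only [cellNamingLoopA, cellNamingInnerA_eq, hlen, List.flatMap_cons, List.append_assoc,
      List.cons_append, cellNamingPass, cellNamingPass_replicate, ih]

-- ===== VERDICT (by name: the statement is the Claim_ definition above) =====
theorem cell_naming_spec : Claim_equal_cell_naming := by
  intro clues _
  unfold Spec_cell_naming cell_naming cell_naming_alt cellNamingSlots
  rw [cellNamingSlots_foldl, cellNamingLoopA_eq]
  simp
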